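-- pv_equiv track=rewrite | github.com/lesh23/CodingTest_Practice | SG/Lv1.py | solution
-- ===== SOURCE A (Python) =====
-- def solution(cards1, cards2, goal):
--     answer1 = []
--     answer2 = []
--     for i in goal:
--         if i in cards1:
--             answer1.append(cards1.index(i))
--         if i in cards2:
--             answer2.append(cards2.index(i))
--     if sorted(answer1) == answer1 and sorted(answer2) == answer2:
--         return "Yes"
--     return "No"
-- ===== SOURCE B (Python) =====
-- def solution(cards1, cards2, goal):
--     last1 = -1
--     last2 = -1
--     for i in goal:
--         if i in cards1:
--             idx = cards1.index(i)
--             if idx < last1: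
--                 return "No"
--             last1 = idx
--         if i in cards2:
--             idx = cards2.index(i)
--             if idx < last2:
--                 return "No"
--             last2 = idx
--     return "Yes"
-- ===== Notes on version B (the rewrite author's own statement) =====
-- stated objective: simpler
-- what changed: replaced the two-phase build-index-lists-then-compare-with-sorted-copies check by a single monotone pass that tracks one running last-index per deck and returns 'No' at the first descent
import Mathlib
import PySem

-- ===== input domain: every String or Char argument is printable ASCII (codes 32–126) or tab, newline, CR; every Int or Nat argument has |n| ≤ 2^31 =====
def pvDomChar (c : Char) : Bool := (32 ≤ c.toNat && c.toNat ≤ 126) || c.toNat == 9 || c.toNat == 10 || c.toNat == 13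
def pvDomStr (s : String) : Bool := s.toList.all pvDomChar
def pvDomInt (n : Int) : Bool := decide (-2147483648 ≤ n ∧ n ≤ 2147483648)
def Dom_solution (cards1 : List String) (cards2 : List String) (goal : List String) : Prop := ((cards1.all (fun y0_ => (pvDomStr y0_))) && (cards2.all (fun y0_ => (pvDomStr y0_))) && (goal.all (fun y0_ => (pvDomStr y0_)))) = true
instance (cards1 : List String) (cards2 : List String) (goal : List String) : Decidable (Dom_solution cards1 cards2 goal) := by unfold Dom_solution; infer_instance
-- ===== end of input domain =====

-- B replaces A's build-two-index-lists-then-compare-with-sorted-copies check by a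
-- single monotone pass tracking one running last-index per deck (objective: simpler).

-- ===== PORT A =====
def solution (cards1 : List String) (cards2 : List String) (goal : List String) : String :=
  let st := goal.foldl (fun (st : List Nat × List Nat) i =>
    let st1 := if i ∈ cards1 then (st.1 ++ [(PySem.List.index? cards1 i).getD 0], st.2) else st
    if i ∈ cards2 then (st1.1, st1.2 ++ [(PySem.List.index? cards2 i).getD 0]) else st1)
    ([], [])
  if PySem.List.sorted st.1 (fun x => x) false = st.1 ∧
     PySem.List.sorted st.2 (fun x => x) false = st.2 then "Yes" else "No"

-- ===== PORT B =====
def solutionAltGo (cards1 : List String) (cards2 : List String) :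
    List String → Int → Int → String
  | [], _, _ => "Yes"
  | i :: rest, last1, last2 =>
    match PySem.List.index? cards1 i with
    | some k =>
        if (k : Int) < last1 then "No"
        else
          match PySem.List.index? cards2 i with
          | some m => if (m : Int) < last2 then "No" else solutionAltGo cards1 cards2 rest k m
          | none => solutionAltGo cards1 cards2 rest k last2
    | none =>
        match PySem.List.index? cards2 i with
        | some m => if (m : Int) < last2 then "No" else solutionAltGo cards1 cards2 rest last1 m
        | none => solutionAltGo cards1 cards2 rest last1 last2

def solution_alt (cards1 : List String) (cards2 : List String) (goal : List String) : String :=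
  solutionAltGo cards1 cards2 goal (-1) (-1)

-- ===== PRECONDITION & SPEC =====
def Spec_solution (cards1 : List String) (cards2 : List String) (goal : List String) (out : String) : Prop := out = solution_alt cards1 cards2 goal
instance (cards1 : List String) (cards2 : List String) (goal : List String) (out : String) : Decidable (Spec_solution cards1 cards2 goal out) := by unfold Spec_solution; infer_instance

-- ===== CLAIM (what is proved, stated in full; the proofs are below) =====
def Claim_equal_solution : Prop := ∀ (cards1 : List String) (cards2 : List String) (goal : List String), Dom_solution cards1 cards2 goal → Spec_solution cards1 cards2 goal (solution cards1 cards2 goal)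

-- ===== LEMMAS AND PROOFS =====

-- the index streams both programs look at
def pvIdx (cards : List String) (goal : List String) : List Nat :=
  goal.filterMap (PySem.List.index? cards)

-- boolean "running last-index never decreases along the stream"
def pvMono : Int → List Nat → Bool
  | _, [] => true
  | l, k :: rest => decide (l ≤ (k : Int)) && pvMono (k : Int) rest

theorem pvIdx_cons (cards : List String) (i : String) (gs : List String) :
    pvIdx cards (i :: gs) =
      match PySem.List.index? cards i with
      | some k => k :: pvIdx cards gs
      | none => pvIdx cards gs := by
  simp only [pvIdx, List.filterMap_cons]
  cases PySem.List.index? cards i <;> rfl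

theorem pvIdx_cons_some (cards : List String) (i : String) (gs : List String) (k : Nat)
    (e : PySem.List.index? cards i = some k) :
    pvIdx cards (i :: gs) = k :: pvIdx cards gs := by
  rw [pvIdx_cons, e]

theorem pvIdx_cons_none (cards : List String) (i : String) (gs : List String)
    (e : PySem.List.index? cards i = none) :
    pvIdx cards (i :: gs) = pvIdx cards gs := by
  rw [pvIdx_cons, e]

-- A's fold builds exactly the two index streams
theorem solution_fold_eq (cards1 cards2 : List String) (goal : List String)
    (a1 a2 : List Nat) :
    goal.foldl (fun (st : List Nat × List Nat) i =>
      let st1 := if i ∈ cards1 then (st.1 ++ [(PySem.List.index? cards1 i).getD 0], st.2) else st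
      if i ∈ cards2 then (st1.1, st1.2 ++ [(PySem.List.index? cards2 i).getD 0]) else st1)
      (a1, a2) = (a1 ++ pvIdx cards1 goal, a2 ++ pvIdx cards2 goal) := by
  induction goal generalizing a1 a2 with
  | nil => simp [pvIdx]
  | cons i gs ih =>
    simp only [List.foldl_cons]
    cases e1 : PySem.List.index? cards1 i with
    | some k =>
      have h1 : i ∈ cards1 := (PySem.List.index?_isSome_iff cards1 i).1 (by rw [e1]; rfl)
      cases e2 : PySem.List.index? cards2 i with
      | some m =>
        have h2 : i ∈ cards2 := (PySem.List.index?_isSome_iff cards2 i).1 (by rw [e2]; rfl)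
        rw [pvIdx_cons_some cards1 i gs k e1, pvIdx_cons_some cards2 i gs m e2]
        simp only [h1, h2, if_pos, e1, e2, Option.getD_some]
        rw [ih]
        simp
      | none =>
        have h2 : i ∉ cards2 := (PySem.List.index?_eq_none_iff cards2 i).1 e2
        rw [pvIdx_cons_some cards1 i gs k e1, pvIdx_cons_none cards2 i gs e2]
        simp only [h1, h2, if_pos, if_neg, not_false_iff, e1, Option.getD_some, ite_false, ite_true]
        rw [ih]
        simp
    | none =>
      have h1 : i ∉ cards1 := (PySem.List.index?_eq_none_iff cards1 i).1 e1
      cases e2 : PySem.List.index? cards2 i with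
      | some m =>
        have h2 : i ∈ cards2 := (PySem.List.index?_isSome_iff cards2 i).1 (by rw [e2]; rfl)
        rw [pvIdx_cons_none cards1 i gs e1, pvIdx_cons_some cards2 i gs m e2]
        simp only [h1, h2, if_neg, not_false_iff, e2, Option.getD_some, ite_false, ite_true]
        rw [ih]
        simp
      | none =>
        have h2 : i ∉ cards2 := (PySem.List.index?_eq_none_iff cards2 i).1 e2
        rw [pvIdx_cons_none cards1 i gs e1, pvIdx_cons_none cards2 i gs e2]
        simp only [h1, h2, if_neg, not_false_iff, ite_false]
        exact ih a1 a2

-- B's loop decides exactly the two monotonicity checks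
theorem solutionAltGo_eq (cards1 cards2 : List String) (goal : List String)
    (l1 l2 : Int) :
    solutionAltGo cards1 cards2 goal l1 l2 =
      if pvMono l1 (pvIdx cards1 goal) && pvMono l2 (pvIdx cards2 goal)
      then "Yes" else "No" := by
  induction goal generalizing l1 l2 with
  | nil => simp [solutionAltGo, pvIdx, pvMono]
  | cons i gs ih =>
    cases e1 : PySem.List.index? cards1 i with
    | some k =>
      rw [pvIdx_cons_some cards1 i gs k e1]
      cases e2 : PySem.List.index? cards2 i with
      | some m =>
        rw [pvIdx_cons_some cards2 i gs m e2]
        simp only [solutionAltGo, e1, e2]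
        by_cases hk : (k : Int) < l1
        · rw [if_pos hk]
          have : ¬ (l1 ≤ (k : Int)) := not_le.2 hk
          simp [pvMono, this]
        · rw [if_neg hk]
          by_cases hm : (m : Int) < l2
          · rw [if_pos hm]
            have : ¬ (l2 ≤ (m : Int)) := not_le.2 hm
            simp [pvMono, this]
          · rw [if_neg hm, ih]
            simp [pvMono, not_lt.1 hk, not_lt.1 hm]
      | none =>
        rw [pvIdx_cons_none cards2 i gs e2]
        simp only [solutionAltGo, e1, e2]
        by_cases hk : (k : Int) < l1
        · rw [if_pos hk]
          have : ¬ (l1 ≤ (k : Int)) := not_le.2 hk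
          simp [pvMono, this]
        · rw [if_neg hk, ih]
          simp [pvMono, not_lt.1 hk]
    | none =>
      rw [pvIdx_cons_none cards1 i gs e1]
      cases e2 : PySem.List.index? cards2 i with
      | some m =>
        rw [pvIdx_cons_some cards2 i gs m e2]
        simp only [solutionAltGo, e1, e2]
        by_cases hm : (m : Int) < l2
        · rw [if_pos hm]
          have : ¬ (l2 ≤ (m : Int)) := not_le.2 hm
          simp [pvMono, this]
        · rw [if_neg hm, ih]
          simp [pvMono, not_lt.1 hm]
      | none =>
        rw [pvIdx_cons_none cards2 i gs e2]
        simp only [solutionAltGo, e1, e2]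
        exact ih l1 l2

theorem pvMono_eq_chain (xs : List Nat) (l : Int) :
    pvMono l xs = true ↔ List.IsChain (· ≤ ·) (l :: xs.map (Nat.cast : Nat → Int)) := by
  induction xs generalizing l with
  | nil => simp [pvMono]
  | cons k rest ih => simp [pvMono, List.isChain_cons_cons, ih]

theorem pvMono_neg_one_iff (xs : List Nat) :
    pvMono (-1) xs = true ↔ xs.Pairwise (· ≤ ·) := by
  rw [pvMono_eq_chain, List.isChain_iff_pairwise, List.pairwise_cons]
  constructor
  · intro h
    have := h.2
    rw [List.pairwise_map] at this
    exact this.imp (by intro a b hab; exact_mod_cast hab)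
  · intro h
    refine ⟨?_, ?_⟩
    · intro a ha
      rcases List.mem_map.1 ha with ⟨n, _, rfl⟩
      have : (0 : Int) ≤ (n : Int) := Int.natCast_nonneg n
      omega
    · rw [List.pairwise_map]
      exact h.imp (by intro a b hab; exact_mod_cast hab)

theorem sorted_eq_self_iff (xs : List Nat) :
    PySem.List.sorted xs (fun x => x) false = xs ↔ xs.Pairwise (· ≤ ·) := by
  constructor
  · intro h
    have := PySem.List.sorted_pairwise (xs := xs) (key := fun x => x)
    rw [h] at this
    exact this
  · intro h
    apply PySem.List.sorted_eq_self_of_pairwise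
    exact h

-- ===== VERDICT (by name: the statement is the Claim_ definition above) =====
theorem solution_spec : Claim_equal_solution := by
  intro cards1 cards2 goal _
  unfold Spec_solution solution solution_alt
  rw [solution_fold_eq cards1 cards2 goal [] []]
  rw [solutionAltGo_eq]
  simp only [List.nil_append, Bool.and_eq_true]
  simp only [sorted_eq_self_iff, pvMono_neg_one_iff]
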